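-- pv_equiv track=rewrite | github.com/SameerJain/CodepathTP101 | unit_2_dictionaries/session2_6_12/pset_1.py | get_highest_priority_task
-- ===== SOURCE A (Python) =====
-- def get_highest_priority_task(tasks):
--
--     highest_task_value = 0
--     highest_task = ""
--
--     for key, value in tasks.items():
--         if value > highest_task_value:
--             highest_task_value = value
--             highest_task = key
--         elif value == highest_task_value:
--             highest_task = min(highest_task,key)
--     tasks.pop(highest_task)
--
--     return highest_task
-- ===== SOURCE B (Python) =====
-- def get_highest_priority_task(tasks):
--     # Pass 1: find the best (maximum) priority value; 0 if the dict is empty.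
--     vals = list(tasks.values())
--     best = max(vals) if vals else 0
--     # Pass 2: among keys achieving that value, pick the lexicographically
--     # smallest; if no priority is positive there is no winner ("").
--     if best > 0:
--         highest = min(k for k, v in tasks.items() if v == best)
--     else:
--         highest = ""
--     tasks.pop(highest)
--     return highest
-- ===== Notes on version B (the rewrite author's own statement) =====
-- stated objective: simpler
-- what changed: Replaces the single running-best loop (tracking max value and min tied key together) by two independent passes: first compute the maximum value, then take the min key among the entries achieving it.
import Mathlib
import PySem

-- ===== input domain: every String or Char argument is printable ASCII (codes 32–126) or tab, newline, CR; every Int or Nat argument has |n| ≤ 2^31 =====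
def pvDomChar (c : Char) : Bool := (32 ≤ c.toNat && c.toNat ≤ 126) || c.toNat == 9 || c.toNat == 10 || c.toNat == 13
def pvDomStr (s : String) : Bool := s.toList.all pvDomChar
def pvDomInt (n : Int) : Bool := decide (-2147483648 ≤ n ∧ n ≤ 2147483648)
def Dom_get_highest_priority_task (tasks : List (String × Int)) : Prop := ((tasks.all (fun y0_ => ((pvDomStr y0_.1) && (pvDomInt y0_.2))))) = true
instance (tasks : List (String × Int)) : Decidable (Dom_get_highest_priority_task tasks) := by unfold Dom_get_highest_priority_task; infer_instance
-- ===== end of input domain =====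

-- B replaces A's single running-best loop by two independent passes (max value, then min key
-- achieving it) — objective: simpler. Both Pythons pop the returned key from the dict (same
-- mutation); the equivalence proved here is about the return value.

-- ===== PORT A =====
-- A's loop body: track (highest_task_value, highest_task).
def pvStepA (st : Int × String) (kv : String × Int) : Int × String :=
  if st.1 < kv.2 then (kv.2, kv.1)
  else if kv.2 = st.1 then (st.1, min st.2 kv.1)
  else st

def get_highest_priority_task (tasks : List (String × Int)) : String :=
  (tasks.foldl pvStepA ((0 : Int), "")).2

-- ===== PORT B =====
def get_highest_priority_task_alt (tasks : List (String × Int)) : String :=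
  let vals := tasks.map Prod.snd
  let best : Int := match PySem.List.max? vals (fun x => x) with
    | some m => m
    | none => 0
  if 0 < best then
    match PySem.List.min? ((tasks.filter (fun kv => kv.2 == best)).map Prod.fst) (fun x => x) with
    | some k => k
    | none => ""   -- unreachable: best is attained by some entry
  else ""

-- ===== PRECONDITION & SPEC =====
-- Pre_ excludes exactly the inputs where the Python A raises KeyError on tasks.pop: when no
-- value is positive and "" is not a key, the winner is the sentinel "" which is not in the dict.
def Pre_get_highest_priority_task (tasks : List (String × Int)) : Prop :=
  (∃ kv ∈ tasks, 0 < kv.2) ∨ (∃ kv ∈ tasks, kv.1 = "")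
instance (tasks : List (String × Int)) : Decidable (Pre_get_highest_priority_task tasks) := by unfold Pre_get_highest_priority_task; infer_instance

def pvWitness_get_highest_priority_task : (List (String × Int)) := [("a", 1)]

def Spec_get_highest_priority_task (tasks : List (String × Int)) (out : String) : Prop := out = get_highest_priority_task_alt tasks
instance (tasks : List (String × Int)) (out : String) : Decidable (Spec_get_highest_priority_task tasks out) := by unfold Spec_get_highest_priority_task; infer_instance

-- ===== CLAIM (what is proved, stated in full; the proofs are below) =====
def Claim_equal_get_highest_priority_task : Prop := ∀ (tasks : List (String × Int)), Dom_get_highest_priority_task tasks → Pre_get_highest_priority_task tasks → Spec_get_highest_priority_task tasks (get_highest_priority_task tasks)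

-- ===== LEMMAS AND PROOFS =====

-- running max of the values, seeded with v
def pvAmax (l : List (String × Int)) (v : Int) : Int :=
  l.foldl (fun a p => max a p.2) v

-- the candidate keys whose minimum A's loop ends up holding: the seed key k (iff the seed value
-- v is itself the final max) followed by every key whose value equals the final max
def pvCand (l : List (String × Int)) (v : Int) (k : String) : List String :=
  (if pvAmax l v = v then [k] else []) ++ (l.filter (fun p => p.2 == pvAmax l v)).map Prod.fst

def pvMymin : List String → Option String
  | [] => none
  | h :: t => some (t.foldl min h)

theorem pv_empty_le (s : String) : "" ≤ s := by
  rw [String.le_iff_toList_le]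
  cases h : s.toList with
  | nil => simp
  | cons a t => exact le_of_lt (List.Lex.nil)

theorem pv_foldl_min_empty (l : List String) : l.foldl min "" = "" := by
  induction l with
  | nil => rfl
  | cons a t ih => simpa [min_eq_left (pv_empty_le a)] using ih

theorem pv_le_amax (l : List (String × Int)) (v : Int) : v ≤ pvAmax l v := by
  induction l generalizing v with
  | nil => exact le_refl v
  | cons p t ih => exact le_trans (le_max_left v p.2) (ih (max v p.2))

-- the loop invariant: A's fold computes the running max and the min of the candidate list
theorem pv_keyA (l : List (String × Int)) (v : Int) (k : String) :
    (l.foldl pvStepA (v, k)).1 = pvAmax l v ∧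
    pvCand l v k ≠ [] ∧
    some (l.foldl pvStepA (v, k)).2 = pvMymin (pvCand l v k) := by
  induction l generalizing v k with
  | nil => simp [pvAmax, pvCand, pvMymin]
  | cons p t ih =>
    have hstep : List.foldl pvStepA (v, k) (p :: t) = List.foldl pvStepA (pvStepA (v, k) p) t := rfl
    rcases lt_trichotomy v p.2 with hlt | heq | hgt
    · -- new maximum: state becomes (p.2, p.1)
      have hs : pvStepA (v, k) p = (p.2, p.1) := by simp [pvStepA, hlt]
      have hM : pvAmax (p :: t) v = pvAmax t p.2 := by
        simp [pvAmax, List.foldl_cons, max_eq_right (le_of_lt hlt)]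
      have hne : pvAmax (p :: t) v ≠ v := by
        have := pv_le_amax t p.2; rw [hM]; omega
      have hcand : pvCand (p :: t) v k = pvCand t p.2 p.1 := by
        have hpv : p.2 ≠ v := by omega
        by_cases h2 : p.2 = pvAmax t p.2
        · simp [pvCand, hM, Eq.symm h2, hpv]
        · have hne' : pvAmax t p.2 ≠ v := by rw [hM] at hne; exact hne
          simp [pvCand, hM, h2, Ne.symm h2, hne']
      rw [hstep, hs, hcand, hM]
      exact ih p.2 p.1
    · -- tie with the current best: key becomes min k p.1
      have hs : pvStepA (v, k) p = (v, min k p.1) := by simp [pvStepA, heq]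
      have hM : pvAmax (p :: t) v = pvAmax t v := by
        simp [pvAmax, List.foldl_cons, max_eq_left (le_of_eq heq.symm)]
      obtain ⟨ih1, ih2, ih3⟩ := ih v (min k p.1)
      by_cases hv : pvAmax t v = v
      · have hMv : pvAmax (p :: t) v = v := by rw [hM, hv]
        have hcand : pvCand (p :: t) v k = k :: p.1 :: (t.filter (fun q => q.2 == v)).map Prod.fst := by
          simp [pvCand, hMv, Eq.symm heq]
        have hcand' : pvCand t v (min k p.1) = min k p.1 :: (t.filter (fun q => q.2 == v)).map Prod.fst := by
          simp [pvCand, hv]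
        refine ⟨by rw [hstep, hs, ih1, hM], by simp [hcand], ?_⟩
        rw [hstep, hs, hcand]
        rw [hcand'] at ih3
        simpa [pvMymin] using ih3
      · have hcand : pvCand (p :: t) v k = pvCand t v (min k p.1) := by
          have hne2 : p.2 ≠ pvAmax t v := fun h => hv (by omega)
          simp [pvCand, hM, hv, hne2]
        rw [hstep, hs, hcand, hM]
        exact ⟨ih1, ih2, ih3⟩
    · -- smaller value: state unchanged
      have hs : pvStepA (v, k) p = (v, k) := by
        have h1 : ¬ v < p.2 := by omega
        have h2 : p.2 ≠ v := by omega
        simp [pvStepA, h1, h2]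
      have hM : pvAmax (p :: t) v = pvAmax t v := by
        simp [pvAmax, List.foldl_cons, max_eq_left (le_of_lt hgt)]
      have hcand : pvCand (p :: t) v k = pvCand t v k := by
        have hne2 : p.2 ≠ pvAmax t v := by
          have := pv_le_amax t v; omega
        simp [pvCand, hM, hne2]
      rw [hstep, hs, hcand, hM]
      exact ih v k

theorem pv_amax_map (l : List (String × Int)) (v : Int) :
    pvAmax l v = (l.map Prod.snd).foldl max v := by
  simp [pvAmax, List.foldl_map]

theorem pv_main (tasks : List (String × Int)) :
    get_highest_priority_task tasks = get_highest_priority_task_alt tasks := by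
  obtain ⟨h1, h2, h3⟩ := pv_keyA tasks 0 ""
  cases htasks : tasks with
  | nil => rfl
  | cons p t =>
    -- best = max of the values; pvAmax tasks 0 = max 0 best
    have hbest : PySem.List.max? (p.2 :: t.map Prod.snd) (fun x => x)
        = some ((t.map Prod.snd).foldl max p.2) := by
      simp [PySem.List.max?_id_cons]
    have hM : pvAmax (p :: t) 0 = max 0 ((t.map Prod.snd).foldl max p.2) := by
      rw [pv_amax_map]
      simpa using (List.foldl_assoc (op := (max : Int → Int → Int))
        (l := t.map Prod.snd) (a₁ := (0 : Int)) (a₂ := p.2))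
    set best : Int := (t.map Prod.snd).foldl max p.2 with hbdef
    subst htasks
    by_cases hpos : 0 < best
    · -- positive maximum: the candidate list is exactly B's filtered key list
      have hMb : pvAmax (p :: t) 0 = best := by rw [hM]; omega
      have hne0 : pvAmax (p :: t) 0 ≠ 0 := by omega
      have hb0 : best ≠ 0 := by omega
      have hcand : pvCand (p :: t) 0 "" = ((p :: t).filter (fun kv => kv.2 == best)).map Prod.fst := by
        simp [pvCand, hMb, hb0]
      rw [hcand] at h2 h3
      cases hks : ((p :: t).filter (fun kv => kv.2 == best)).map Prod.fst with
      | nil => exact absurd hks h2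
      | cons h tl =>
        rw [hks] at h3
        simp [pvMymin] at h3
        have halt : get_highest_priority_task_alt (p :: t) = tl.foldl min h := by
          simp [get_highest_priority_task_alt, hbest, hpos, hks, PySem.List.min?_id_cons]
        rw [halt]
        simpa [get_highest_priority_task] using h3
    · -- no positive value: A's sentinel "" wins the min, B returns "" directly
      have hM0 : pvAmax (p :: t) 0 = 0 := by rw [hM]; omega
      have hcand : pvCand (p :: t) 0 "" = "" :: ((p :: t).filter (fun kv => kv.2 == (0:Int))).map Prod.fst := by
        simp [pvCand, hM0]
      rw [hcand] at h3
      simp [pvMymin, pv_foldl_min_empty] at h3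
      have halt : get_highest_priority_task_alt (p :: t) = "" := by
        simp [get_highest_priority_task_alt, hbest, hpos]
      rw [halt]
      simpa [get_highest_priority_task] using h3

-- ===== VERDICT (by name: the statement is the Claim_ definition above) =====
theorem get_highest_priority_task_spec : Claim_equal_get_highest_priority_task := by
  intro tasks _ _
  unfold Spec_get_highest_priority_task
  exact pv_main tasks
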